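-- pv_equiv track=rewrite | github.com/elizarev/chess_board_dictionary_validator | functions.py | valid_chess_position
-- ===== SOURCE A (Python) =====
-- def valid_chess_position(chessboard):
--     chess_position = [
--         'a1', 'a2', 'a3', 'a4', 'a5', 'a6', 'a7', 'a8',
--         'b1', 'b2', 'b3', 'b4', 'b5', 'b6', 'b7', 'b8',
--         'c1', 'c2', 'c3', 'c4', 'c5', 'c6', 'c7', 'c8',
--         'd1', 'd2', 'd3', 'd4', 'd5', 'd6', 'd7', 'd8',
--         'e1', 'e2', 'e3', 'e4', 'e5', 'e6', 'e7', 'e8',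
--         'f1', 'f2', 'f3', 'f4', 'f5', 'f6', 'f7', 'f8',
--         'g1', 'g2', 'g3', 'g4', 'g5', 'g6', 'g7', 'g8',
--         'h1', 'h2', 'h3', 'h4', 'h5', 'h6', 'h7', 'h8',
--     ]
--     for k in chessboard.keys():
--         if k not in chess_position:
--             return False
--     return True
-- ===== SOURCE B (Python) =====
-- def valid_chess_position(chessboard):
--     # Parse each key instead of membership in a 64-element list:
--     # a square is a 2-char string 'a'..'h' then '1'..'8'.
--     return all(
--         isinstance(k, str) and len(k) == 2
--         and 'a' <= k[0] <= 'h' and '1' <= k[1] <= '8'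
--         for k in chessboard.keys()
--     )
-- ===== Notes on version B (the rewrite author's own statement) =====
-- stated objective: idiomatic
-- what changed: Replaces the 64-element square list and per-key linear membership scan with a constant-time per-key parse (length 2, file in a-h, rank in 1-8) folded through all().
import Mathlib
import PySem

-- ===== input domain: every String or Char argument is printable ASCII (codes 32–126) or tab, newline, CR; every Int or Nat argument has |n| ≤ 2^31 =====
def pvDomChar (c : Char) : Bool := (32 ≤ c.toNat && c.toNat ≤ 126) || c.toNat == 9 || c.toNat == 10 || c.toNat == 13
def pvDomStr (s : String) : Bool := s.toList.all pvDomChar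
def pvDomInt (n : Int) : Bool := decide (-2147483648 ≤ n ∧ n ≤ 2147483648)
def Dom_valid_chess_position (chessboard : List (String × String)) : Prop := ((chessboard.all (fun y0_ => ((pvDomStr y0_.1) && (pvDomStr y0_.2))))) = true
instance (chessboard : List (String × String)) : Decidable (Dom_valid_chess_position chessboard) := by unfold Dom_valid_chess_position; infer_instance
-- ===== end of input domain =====

-- B replaces A's 64-element square list and per-key linear membership scan with a
-- constant-time per-key parse (length-2 string, file 'a'..'h', rank '1'..'8'); idiomatic.


-- ===== PORT A =====
-- A's literal 64-element list of squares
def pvChessPositionA : List String := [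
  "a1", "a2", "a3", "a4", "a5", "a6", "a7", "a8",
  "b1", "b2", "b3", "b4", "b5", "b6", "b7", "b8",
  "c1", "c2", "c3", "c4", "c5", "c6", "c7", "c8",
  "d1", "d2", "d3", "d4", "d5", "d6", "d7", "d8",
  "e1", "e2", "e3", "e4", "e5", "e6", "e7", "e8",
  "f1", "f2", "f3", "f4", "f5", "f6", "f7", "f8",
  "g1", "g2", "g3", "g4", "g5", "g6", "g7", "g8",
  "h1", "h2", "h3", "h4", "h5", "h6", "h7", "h8"]

-- the 'for k in chessboard.keys(): if k not in …: return False' loop (early return)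
def pvLoopA : List String → Bool
  | [] => true
  | k :: rest => if !(pvChessPositionA.contains k) then false else pvLoopA rest

def valid_chess_position (chessboard : List (String × String)) : Bool :=
  pvLoopA (chessboard.map Prod.fst)

-- ===== PORT B =====
-- 'isinstance str' is vacuous under the type convention; len(k)==2 with the two char-range tests
def pvSquareOk (k : String) : Bool :=
  match k.toList with
  | [c, d] => (decide ('a' ≤ c) && decide (c ≤ 'h')) && (decide ('1' ≤ d) && decide (d ≤ '8'))
  | _ => false

def valid_chess_position_alt (chessboard : List (String × String)) : Bool :=
  (chessboard.map Prod.fst).all pvSquareOk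

-- ===== PRECONDITION & SPEC =====
def Spec_valid_chess_position (chessboard : List (String × String)) (out : Bool) : Prop := out = valid_chess_position_alt chessboard
instance (chessboard : List (String × String)) (out : Bool) : Decidable (Spec_valid_chess_position chessboard out) := by unfold Spec_valid_chess_position; infer_instance

-- ===== CLAIM (what is proved, stated in full; the proofs are below) =====
def Claim_equal_valid_chess_position : Prop := ∀ (chessboard : List (String × String)), Dom_valid_chess_position chessboard → Spec_valid_chess_position chessboard (valid_chess_position chessboard)

-- ===== LEMMAS AND PROOFS =====
def pvFiles : List Char := ['a','b','c','d','e','f','g','h']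
def pvRanks : List Char := ['1','2','3','4','5','6','7','8']

theorem pv_char_eq_of_toNat {c ch : Char} (h : c.toNat = ch.toNat) : c = ch :=
  Char.ext_iff.mpr (UInt32.toNat_inj.mp h)

theorem pv_mem_files (c : Char) : (c ∈ pvFiles) ↔ (97 ≤ c.toNat ∧ c.toNat ≤ 104) := by
  constructor
  · intro h; fin_cases h <;> simp
  · rintro ⟨h1, h2⟩
    have h8 : c.toNat = 97 ∨ c.toNat = 98 ∨ c.toNat = 99 ∨ c.toNat = 100 ∨ c.toNat = 101 ∨ c.toNat = 102 ∨ c.toNat = 103 ∨ c.toNat = 104 := by omega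
    rcases h8 with h|h|h|h|h|h|h|h
    · rw [pv_char_eq_of_toNat (c := c) (ch := 'a') (by rw [h]; decide)]; decide
    · rw [pv_char_eq_of_toNat (c := c) (ch := 'b') (by rw [h]; decide)]; decide
    · rw [pv_char_eq_of_toNat (c := c) (ch := 'c') (by rw [h]; decide)]; decide
    · rw [pv_char_eq_of_toNat (c := c) (ch := 'd') (by rw [h]; decide)]; decide
    · rw [pv_char_eq_of_toNat (c := c) (ch := 'e') (by rw [h]; decide)]; decide
    · rw [pv_char_eq_of_toNat (c := c) (ch := 'f') (by rw [h]; decide)]; decide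
    · rw [pv_char_eq_of_toNat (c := c) (ch := 'g') (by rw [h]; decide)]; decide
    · rw [pv_char_eq_of_toNat (c := c) (ch := 'h') (by rw [h]; decide)]; decide

theorem pv_mem_ranks (d : Char) : (d ∈ pvRanks) ↔ (49 ≤ d.toNat ∧ d.toNat ≤ 56) := by
  constructor
  · intro h; fin_cases h <;> simp
  · rintro ⟨h1, h2⟩
    have h8 : d.toNat = 49 ∨ d.toNat = 50 ∨ d.toNat = 51 ∨ d.toNat = 52 ∨ d.toNat = 53 ∨ d.toNat = 54 ∨ d.toNat = 55 ∨ d.toNat = 56 := by omega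
    rcases h8 with h|h|h|h|h|h|h|h
    · rw [pv_char_eq_of_toNat (c := d) (ch := '1') (by rw [h]; decide)]; decide
    · rw [pv_char_eq_of_toNat (c := d) (ch := '2') (by rw [h]; decide)]; decide
    · rw [pv_char_eq_of_toNat (c := d) (ch := '3') (by rw [h]; decide)]; decide
    · rw [pv_char_eq_of_toNat (c := d) (ch := '4') (by rw [h]; decide)]; decide
    · rw [pv_char_eq_of_toNat (c := d) (ch := '5') (by rw [h]; decide)]; decide
    · rw [pv_char_eq_of_toNat (c := d) (ch := '6') (by rw [h]; decide)]; decide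
    · rw [pv_char_eq_of_toNat (c := d) (ch := '7') (by rw [h]; decide)]; decide
    · rw [pv_char_eq_of_toNat (c := d) (ch := '8') (by rw [h]; decide)]; decide

theorem pv_ge_a (c : Char) : ('a' ≤ c) ↔ (97 ≤ c.toNat) := by
  rw [Char.le_def, UInt32.le_iff_toNat_le]; exact Iff.rfl
theorem pv_le_h (c : Char) : (c ≤ 'h') ↔ (c.toNat ≤ 104) := by
  rw [Char.le_def, UInt32.le_iff_toNat_le]; exact Iff.rfl
theorem pv_ge_1 (d : Char) : ('1' ≤ d) ↔ (49 ≤ d.toNat) := by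
  rw [Char.le_def, UInt32.le_iff_toNat_le]; exact Iff.rfl
theorem pv_le_8 (d : Char) : (d ≤ '8') ↔ (d.toNat ≤ 56) := by
  rw [Char.le_def, UInt32.le_iff_toNat_le]; exact Iff.rfl

theorem pv_board_flatMap : pvChessPositionA = (pvFiles.flatMap fun x => pvRanks.map fun y => String.ofList [x, y]) := by
  decide

theorem pv_mem_board (c d : Char) :
    (String.ofList [c, d] ∈ pvChessPositionA) ↔ (c ∈ pvFiles ∧ d ∈ pvRanks) := by
  rw [pv_board_flatMap]
  simp [List.mem_flatMap, String.ofList_inj]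

theorem pv_contains_eq_squareOk (k : String) : pvChessPositionA.contains k = pvSquareOk k := by
  obtain ⟨l, rfl⟩ : ∃ l, k = String.ofList l := ⟨k.toList, String.ofList_toList.symm⟩
  rw [Bool.eq_iff_iff]
  match l with
  | [c, d] =>
    simp only [pvSquareOk, String.toList_ofList, List.contains_iff_mem, pv_mem_board]
    rw [pv_mem_files, pv_mem_ranks]
    simp only [Bool.and_eq_true, decide_eq_true_eq, pv_ge_a, pv_le_h, pv_ge_1, pv_le_8]
  | [] =>
    simp only [pvSquareOk, String.toList_ofList, List.contains_iff_mem]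
    rw [pv_board_flatMap]
    simp [List.mem_flatMap, ← String.toList_inj]
  | [c] =>
    simp only [pvSquareOk, String.toList_ofList, List.contains_iff_mem]
    rw [pv_board_flatMap]
    simp [List.mem_flatMap, String.ofList_inj]
  | c :: d :: e :: rest =>
    simp only [pvSquareOk, String.toList_ofList, List.contains_iff_mem]
    rw [pv_board_flatMap]
    simp [List.mem_flatMap, String.ofList_inj]

theorem pv_loopA_eq_all (ks : List String) : pvLoopA ks = ks.all pvSquareOk := by
  induction ks with
  | nil => rfl
  | cons k rest ih =>
    simp only [pvLoopA, List.all_cons, pv_contains_eq_squareOk, ih]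
    cases pvSquareOk k <;> simp

-- ===== VERDICT (by name: the statement is the Claim_ definition above) =====
theorem valid_chess_position_spec : Claim_equal_valid_chess_position := by
  intro chessboard _
  unfold Spec_valid_chess_position valid_chess_position valid_chess_position_alt
  exact pv_loopA_eq_all _
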